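-- pv_equiv track=rewrite | github.com/DanBerolsky/Tp-Algorimos | consulta_de_funciones.py | generar_lista_total
-- ===== SOURCE A (Python) =====
-- def generar_lista_total(dic):
--     """[Autor: Valentin]"""
--     """[Ayuda: Genera una lista de listas con los nombres de las funciones ordenadas alfabeticamente]"""
--     lista_total = [[]]
--     for i in dic:
--         ultima_lista = lista_total[-1]
--         if len(ultima_lista) < 5:
--             ultima_lista.append(format(i, "<26s"))
--         else:
--             lista_total.append([])
--             ultima_lista = lista_total[-1]
--             ultima_lista.append(format(i, "<26s"))
--     if len(lista_total[-1]) < 5: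
--         for i in range(0, 5-len(lista_total[-1])):
--             lista_total[-1].append(format(" ", "<26s"))
--     return lista_total
-- ===== SOURCE B (Python) =====
-- def generar_lista_total(dic):
--     formatted = [format(k, "<26s") for k in dic]
--     lista_total = [formatted[i:i + 5] for i in range(0, len(formatted), 5)] or [[]]
--     last = lista_total[-1]
--     last.extend([format(" ", "<26s")] * (5 - len(last)))
--     return lista_total
-- ===== Notes on version B (the rewrite author's own statement) =====
-- stated objective: simpler
-- what changed: Replaces A's per-element last-row-length check/append loop with a precomputed list of formatted keys, slice-based chunking into rows of five, and a single final pad of the last row.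
import Mathlib
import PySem

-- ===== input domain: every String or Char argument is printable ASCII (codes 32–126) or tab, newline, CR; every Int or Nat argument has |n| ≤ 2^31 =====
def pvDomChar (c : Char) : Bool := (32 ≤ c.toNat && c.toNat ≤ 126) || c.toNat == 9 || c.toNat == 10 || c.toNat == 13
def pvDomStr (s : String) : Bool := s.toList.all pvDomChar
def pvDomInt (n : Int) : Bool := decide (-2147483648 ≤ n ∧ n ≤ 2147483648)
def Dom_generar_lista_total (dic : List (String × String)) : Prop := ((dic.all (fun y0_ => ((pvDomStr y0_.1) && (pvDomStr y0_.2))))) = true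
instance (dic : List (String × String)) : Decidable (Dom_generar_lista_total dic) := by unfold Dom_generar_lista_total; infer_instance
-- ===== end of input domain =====

-- B replaces A's per-element last-row bookkeeping loop with slice-based chunking plus one final pad (simpler decomposition, same cost).

-- format(s, "<26s"): left-justify in 26 columns with spaces (exact for str arguments; built on List Char)
def pvFmt26 (s : String) : String := String.ofList (s.toList ++ List.replicate (26 - s.toList.length) ' ')

-- ===== PORT A =====
-- one iteration of A's `for i in dic` loop (state lista_total is always nonempty)
def pvStepA (acc : List (List String)) (k : String) : List (List String) :=
  let ultima := acc.getLast!
  if ultima.length < 5 then acc.dropLast ++ [ultima ++ [pvFmt26 k]]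
  else acc ++ [[pvFmt26 k]]

def generar_lista_total (dic : List (String × String)) : List (List String) :=
  let lista_total := dic.foldl (fun acc kv => pvStepA acc kv.1) [[]]
  if lista_total.getLast!.length < 5 then
    -- the padding loop `for i in range(0, 5-len)` appends 5-len copies
    lista_total.dropLast ++ [lista_total.getLast! ++ List.replicate (5 - lista_total.getLast!.length) (pvFmt26 " ")]
  else lista_total

-- ===== PORT B =====
def generar_lista_total_alt (dic : List (String × String)) : List (List String) :=
  let formatted := dic.map (fun kv => pvFmt26 kv.1)
  let chunks := (PySem.List.pyRange 0 formatted.length 5).map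
    (fun i => PySem.List.slice formatted (some i) (some (i + 5)))
  let lista_total := if chunks = [] then [[]] else chunks
  -- last.extend([pad] * (5 - len(last))) mutates the last row in place
  lista_total.dropLast ++ [lista_total.getLast! ++ List.replicate (5 - lista_total.getLast!.length) (pvFmt26 " ")]

-- ===== PRECONDITION & SPEC =====
def Spec_generar_lista_total (dic : List (String × String)) (out : List (List String)) : Prop := out = generar_lista_total_alt dic
instance (dic : List (String × String)) (out : List (List String)) : Decidable (Spec_generar_lista_total dic out) := by unfold Spec_generar_lista_total; infer_instance

-- ===== CLAIM (what is proved, stated in full; the proofs are below) =====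
def Claim_equal_generar_lista_total : Prop := ∀ (dic : List (String × String)), Dom_generar_lista_total dic → Spec_generar_lista_total dic (generar_lista_total dic)

-- ===== LEMMAS AND PROOFS =====

-- small getLast!/dropLast facts used throughout
theorem pvGetLast!_singleton {α : Type} [Inhabited α] (a : α) : ([a] : List α).getLast! = a := by
  simp [List.getLast!]

theorem pvGetLast!_cons {α : Type} [Inhabited α] (a : α) (l : List α) (h : l ≠ []) :
    (a :: l).getLast! = l.getLast! := by
  rw [List.getLast!_eq_getLast?_getD, List.getLast!_eq_getLast?_getD, List.getLast?_cons,
    List.getLast?_eq_some_getLast h]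
  simp

theorem pvDropLast_concat {α : Type} [Inhabited α] (l : List α) (h : l ≠ []) :
    l.dropLast ++ [l.getLast!] = l := by
  rw [List.getLast!_eq_getLast?_getD, List.getLast?_eq_some_getLast h]
  exact List.dropLast_concat_getLast h

-- the natural recursive chunker: both ports' row lists reduce to it
def chunk5 {α : Type} (xs : List α) : List (List α) :=
  if xs = [] then [] else xs.take 5 :: chunk5 (xs.drop 5)
termination_by xs.length
decreasing_by rename_i h; cases xs with
  | nil => exact absurd rfl h
  | cons a l => simp only [List.length_drop, List.length_cons]; omega

theorem chunk5_nil {α : Type} : chunk5 ([] : List α) = [] := by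
  rw [chunk5.eq_def]; simp

theorem chunk5_cons {α : Type} (xs : List α) (h : xs ≠ []) :
    chunk5 xs = xs.take 5 :: chunk5 (xs.drop 5) := by
  rw [chunk5.eq_def]; simp [h]

theorem chunk5_ne_nil {α : Type} (xs : List α) (h : xs ≠ []) : chunk5 xs ≠ [] := by
  rw [chunk5_cons xs h]; simp

theorem chunk5_eq_map_range {α : Type} (xs : List α) :
    chunk5 xs = (List.range ((xs.length + 4) / 5)).map (fun k => (xs.drop (5 * k)).take 5) := by
  by_cases h : xs = []
  · subst h; rw [chunk5_nil]; simp
  · rw [chunk5_cons xs h]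
    have ih := chunk5_eq_map_range (xs.drop 5)
    have hx : 0 < xs.length := List.length_pos_of_ne_nil h
    have hm : (xs.length + 4) / 5 = ((xs.drop 5).length + 4) / 5 + 1 := by
      simp only [List.length_drop]; omega
    rw [ih, hm, List.range_succ_eq_map]
    simp only [List.map_cons, List.map_map, List.drop_zero, Nat.mul_zero, Function.comp_def]
    congr 1
    apply List.map_congr_left
    intro k _
    rw [List.drop_drop]
    congr 2
    omega
termination_by xs.length
decreasing_by simp only [List.length_drop]; have := List.length_pos_of_ne_nil h; omega

-- B's slice comprehension computes chunk5
theorem chunksB_eq_chunk5 {α : Type} (xs : List α) :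
    (PySem.List.pyRange 0 (xs.length : Int) 5).map
      (fun i => PySem.List.slice xs (some i) (some (i + 5))) = chunk5 xs := by
  rw [PySem.List.pyRange_of_pos 0 (xs.length : Int) (by norm_num), chunk5_eq_map_range]
  by_cases h : xs.length = 0
  · simp [h]
  · have hlt : (0 : Int) < (xs.length : Int) := by exact_mod_cast Nat.pos_of_ne_zero h
    rw [if_pos hlt]
    have hcount : (((xs.length : Int) - 0 + 5 - 1) / 5).toNat = (xs.length + 4) / 5 := by
      omega
    rw [hcount, List.map_map]
    apply List.map_congr_left
    intro k _
    simp only [Function.comp_def]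
    have h1 : (0 : Int) + 5 * (k : Int) = ((5 * k : Nat) : Int) := by push_cast; ring
    rw [h1]
    have h5 : ((5 * k : Nat) : Int) + 5 = ((5 * k : Nat) : Int) + ((5 : Nat) : Int) := by norm_num
    rw [h5, PySem.List.slice_natCast_add]

-- appending one element to a nonempty list acts on chunk5 exactly as A's loop body does
theorem chunk5_append_one {α : Type} [Inhabited α] (xs : List α) (s : α) (h : xs ≠ []) :
    chunk5 (xs ++ [s]) =
      if (chunk5 xs).getLast!.length < 5 then
        (chunk5 xs).dropLast ++ [(chunk5 xs).getLast! ++ [s]]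
      else chunk5 xs ++ [[s]] := by
  have hx : 0 < xs.length := List.length_pos_of_ne_nil h
  by_cases hlen : xs.length ≤ 5
  · -- at most one chunk
    have hdrop : xs.drop 5 = [] := by rw [List.drop_eq_nil_iff]; omega
    have hc : chunk5 xs = [xs] := by
      rw [chunk5_cons xs h, hdrop, chunk5_nil, List.take_of_length_le hlen]
    by_cases h5 : xs.length < 5
    · have hc2 : chunk5 (xs ++ [s]) = [xs ++ [s]] := by
        rw [chunk5_cons (xs ++ [s]) (by simp),
          List.drop_eq_nil_iff.mpr (by simp; omega), chunk5_nil,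
          List.take_of_length_le (by simp; omega)]
      rw [hc2, hc, pvGetLast!_singleton]
      simp [h5]
    · have hlen5 : xs.length = 5 := by omega
      have hc2 : chunk5 (xs ++ [s]) = [xs, [s]] := by
        rw [chunk5_cons (xs ++ [s]) (by simp),
          List.take_append_of_le_length (by omega), List.take_of_length_le hlen,
          List.drop_append_of_le_length (by omega), hdrop, List.nil_append,
          chunk5_cons [s] (by simp),
          show List.drop 5 [s] = ([] : List α) from by simp, chunk5_nil]
        simp
      rw [hc2, hc, pvGetLast!_singleton]
      simp [hlen5]
  · -- more than one chunk: recurse on the tail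
    push_neg at hlen
    have hdne : xs.drop 5 ≠ [] := by rw [Ne, List.drop_eq_nil_iff]; omega
    have hc : chunk5 xs = xs.take 5 :: chunk5 (xs.drop 5) := chunk5_cons xs h
    have hc2 : chunk5 (xs ++ [s]) = xs.take 5 :: chunk5 (xs.drop 5 ++ [s]) := by
      rw [chunk5_cons (xs ++ [s]) (by simp),
        List.take_append_of_le_length (by omega), List.drop_append_of_le_length (by omega)]
    have ih := chunk5_append_one (xs.drop 5) s hdne
    have htne : chunk5 (xs.drop 5) ≠ [] := chunk5_ne_nil _ hdne
    rw [hc2, ih, hc, pvGetLast!_cons _ _ htne]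
    by_cases hcase : (chunk5 (xs.drop 5)).getLast!.length < 5
    · rw [if_pos hcase, if_pos hcase, List.dropLast_cons_of_ne_nil htne]; simp
    · rw [if_neg hcase, if_neg hcase]; simp
termination_by xs.length
decreasing_by simp only [List.length_drop]; omega

-- A's loop state after processing ys: [[]] for no keys, else chunk5 ys
def rows5 (ys : List String) : List (List String) := if ys = [] then [[]] else chunk5 ys

theorem foldl_stepA_eq_rows5 (ys : List String) :
    ys.foldl (fun acc s =>
      if acc.getLast!.length < 5 then acc.dropLast ++ [acc.getLast! ++ [s]]
      else acc ++ [[s]]) [[]] = rows5 ys := by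
  induction ys using List.reverseRecOn with
  | nil => simp [rows5]
  | append_singleton ys s ih =>
    rw [List.foldl_append, List.foldl_cons, List.foldl_nil, ih]
    cases ys with
    | nil =>
      have h1 : rows5 [s] = [[s]] := by
        unfold rows5
        rw [if_neg (by simp), chunk5_cons [s] (by simp)]
        simp [chunk5_nil]
      have h0 : rows5 [] = [[]] := by simp [rows5]
      rw [h0]
      simp only [List.nil_append, h1]
      simp [List.getLast!]
    | cons a l =>
      have hne : (a : String) :: l ≠ [] := by simp
      simp only [rows5, if_neg hne, if_neg (by simp : (a :: l) ++ [s] ≠ [])]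
      rw [chunk5_append_one (a :: l) s hne]

theorem rows5_ne_nil (ys : List String) : rows5 ys ≠ [] := by
  unfold rows5
  by_cases h : ys = []
  · simp [h]
  · simpa [h] using chunk5_ne_nil ys h

theorem pad_eq (lt : List (List String)) (hne : lt ≠ []) :
    (if lt.getLast!.length < 5 then
        lt.dropLast ++ [lt.getLast! ++ List.replicate (5 - lt.getLast!.length) (pvFmt26 " ")]
      else lt) =
    lt.dropLast ++ [lt.getLast! ++ List.replicate (5 - lt.getLast!.length) (pvFmt26 " ")] := by
  by_cases hc : lt.getLast!.length < 5
  · rw [if_pos hc]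
  · rw [if_neg hc]
    have h0 : 5 - lt.getLast!.length = 0 := by omega
    rw [h0, List.replicate_zero, List.append_nil]
    exact (pvDropLast_concat lt hne).symm

-- ===== VERDICT (by name: the statement is the Claim_ definition above) =====
theorem generar_lista_total_spec : Claim_equal_generar_lista_total := by
  intro dic _
  unfold Spec_generar_lista_total
  simp only [generar_lista_total, generar_lista_total_alt, pvStepA]
  rw [chunksB_eq_chunk5 (dic.map (fun kv => pvFmt26 kv.1))]
  have hfold : dic.foldl (fun acc kv =>
      if acc.getLast!.length < 5 then acc.dropLast ++ [acc.getLast! ++ [pvFmt26 kv.1]]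
      else acc ++ [[pvFmt26 kv.1]]) [[]] = rows5 (dic.map (fun kv => pvFmt26 kv.1)) := by
    rw [← foldl_stepA_eq_rows5, ← List.foldl_map (f := fun kv : String × String => pvFmt26 kv.1)
      (g := fun acc s => if acc.getLast!.length < 5 then acc.dropLast ++ [acc.getLast! ++ [s]]
        else acc ++ [[s]]) (l := dic) (init := [[]])]
  rw [hfold]
  have hrows : (if chunk5 (dic.map (fun kv => pvFmt26 kv.1)) = [] then [[]]
      else chunk5 (dic.map (fun kv => pvFmt26 kv.1))) = rows5 (dic.map (fun kv => pvFmt26 kv.1)) := by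
    unfold rows5
    by_cases h : dic.map (fun kv => pvFmt26 kv.1) = []
    · simp [h, chunk5_nil]
    · simp [h, chunk5_ne_nil _ h]
  rw [hrows]
  exact pad_eq _ (rows5_ne_nil _)
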